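-- pv_equiv track=rewrite | github.com/hussu97/pilgrimage-tracker | soulstep-catalog-api/app/services/seo_generator.py | _extract_location
-- ===== SOURCE A (Python) =====
-- def _extract_location(address: str | None) -> str:
--     """Extract city/country hint from the last comma-separated part of address."""
--     if not address:
--         return ""
--     parts = [p.strip() for p in address.split(",")]
--     if len(parts) >= 2:
--         return parts[-1].strip()
--     if len(parts) == 1:
--         return parts[0].strip()
--     return ""
-- ===== SOURCE B (Python) =====
-- def _extract_location(address):
--     """Extract city/country hint from the last comma-separated part of address."""
--     if not address:
--         return ""
--     idx = address.rfind(",")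
--     if idx == -1:
--         return address.strip()
--     return address[idx + 1:].strip()
-- ===== Notes on version B (the rewrite author's own statement) =====
-- stated objective: simpler
-- what changed: Instead of splitting the whole address into a stripped list of comma parts and indexing it, B locates the last comma with rfind and strips the slice after it (or the whole string if there is none).
import Mathlib
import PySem

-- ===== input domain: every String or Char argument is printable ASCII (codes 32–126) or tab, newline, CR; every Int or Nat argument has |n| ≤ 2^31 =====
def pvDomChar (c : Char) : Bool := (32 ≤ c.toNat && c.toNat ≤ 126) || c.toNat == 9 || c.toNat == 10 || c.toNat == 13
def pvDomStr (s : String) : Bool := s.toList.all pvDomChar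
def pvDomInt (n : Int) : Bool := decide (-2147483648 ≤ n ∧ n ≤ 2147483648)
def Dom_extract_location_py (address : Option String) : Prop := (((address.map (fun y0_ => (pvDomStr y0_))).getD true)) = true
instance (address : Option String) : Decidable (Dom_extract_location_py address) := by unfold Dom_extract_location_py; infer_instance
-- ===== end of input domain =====

-- B replaces A's split-into-stripped-parts-and-index by an rfind for the last comma plus a tail slice (objective: simpler).


-- ===== PORT A =====
def extract_location_py (address : Option String) : String :=
  match address with
  | none => ""                                      -- `if not address` (None is falsy)
  | some s =>
    if s = "" then ""                               -- `if not address` ("" is falsy)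
    else
      -- parts = [p.strip() for p in address.split(",")]
      let parts : List String := ((PySem.Str.split? s ",").getD []).map PySem.Str.strip
        -- sep "," ≠ "" so split? is always `some`; getD never yields the default
      if 2 ≤ parts.length then
        ((PySem.List.pyGet? parts (-1)).map PySem.Str.strip).getD ""
          -- parts[-1].strip(); split returns ≥ 1 part so the index is in range, getD never yields the default
      else if parts.length = 1 then
        ((PySem.List.pyGet? parts 0).map PySem.Str.strip).getD ""   -- parts[0].strip(); in range, as above
      else ""

-- ===== PORT B =====
def extract_location_py_alt (address : Option String) : String :=
  match address with
  | none => ""                                      -- `if not address`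
  | some s =>
    if s = "" then ""
    else
      let idx := PySem.Str.rfind s ","
      if idx = -1 then PySem.Str.strip s
      else PySem.Str.strip (PySem.Str.slice s (some (idx + 1)) none)

-- ===== PRECONDITION & SPEC =====
def Spec_extract_location_py (address : Option String) (out : String) : Prop := out = extract_location_py_alt address
instance (address : Option String) (out : String) : Decidable (Spec_extract_location_py address out) := by unfold Spec_extract_location_py; infer_instance

-- ===== CLAIM (what is proved, stated in full; the proofs are below) =====
def Claim_equal_extract_location_py : Prop := ∀ (address : Option String), Dom_extract_location_py address → Spec_extract_location_py address (extract_location_py address)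

-- ===== LEMMAS AND PROOFS =====

-- the maximal comma-free suffix of a char list (the "last comma-separated part")
def pvLastPart : List Char → List Char
| [] => []
| c :: rest => if ',' ∈ (c :: rest) then pvLastPart rest else c :: rest

-- fuel-free model of PySem.Chars.splitOn.go for sep = [','], same accumulators
def pvParts : List Char → List Char → List (List Char)
| cur, [] => [cur.reverse]
| cur, c :: rest => if c = ',' then cur.reverse :: pvParts [] rest else pvParts (c :: cur) rest

theorem pv_isPrefixOf_singleton (a : Char) (l : List Char) :
    [a].isPrefixOf l = true ↔ l.head? = some a := by
  cases l with
  | nil => simp [List.isPrefixOf]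
  | cons b t =>
    have h1 : ([a].isPrefixOf (b :: t)) = (a == b && true) := rfl
    rw [h1, Bool.and_true, List.head?_cons, beq_iff_eq]
    exact ⟨fun h => by rw [h], fun h => (Option.some.inj h).symm⟩

theorem pv_go_eq (fuel : Nat) : ∀ (l cur : List Char) (acc : List (List Char)), l.length ≤ fuel →
    PySem.Chars.splitOn.go [','] fuel l cur acc = acc.reverse ++ pvParts cur l := by
  induction fuel with
  | zero =>
    intro l cur acc h
    have hl : l = [] := List.length_eq_zero_iff.mp (Nat.le_zero.mp h)
    subst hl
    rw [PySem.Chars.splitOn.go]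
    rw [show pvParts cur [] = [cur.reverse] from rfl]
    simp
  | succ n ih =>
    intro l cur acc h
    cases l with
    | nil =>
      rw [PySem.Chars.splitOn.go]
      · rw [show pvParts cur [] = [cur.reverse] from rfl]
        simp
      · omega
    | cons c rest =>
      rw [PySem.Chars.splitOn.go]
      by_cases hc : c = ','
      · subst hc
        have hp : [','].isPrefixOf (',' :: rest) = true := by
          rw [pv_isPrefixOf_singleton]; rfl
        simp only [hp, if_true, List.length_singleton, List.drop_succ_cons, List.drop_zero]
        rw [ih rest [] (cur.reverse :: acc) (by simpa using Nat.le_of_succ_le_succ h)]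
        simp [pvParts]
      · have hp : [','].isPrefixOf (c :: rest) = false := by
          rw [Bool.eq_false_iff]
          intro hcon
          exact hc (by simpa using (pv_isPrefixOf_singleton ',' (c :: rest)).mp hcon)
        simp only [hp, Bool.false_eq_true]
        rw [ih rest (c :: cur) acc (by simpa using Nat.le_of_succ_le_succ h)]
        simp [pvParts, hc]

theorem pv_splitOn_eq (cs : List Char) : PySem.Chars.splitOn cs [','] = pvParts [] cs := by
  show PySem.Chars.splitOn.go [','] (cs.length + 1) cs [] [] = pvParts [] cs
  rw [pv_go_eq (cs.length + 1) cs [] [] (Nat.le_succ _)]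
  simp

theorem pv_parts_ne_nil (cur l : List Char) : pvParts cur l ≠ [] := by
  induction l generalizing cur with
  | nil => simp [pvParts]
  | cons c rest ih =>
    rw [pvParts]
    by_cases hc : c = ',' <;> simp [hc, ih]

theorem pv_lastPart_nocomma (l : List Char) (h : ',' ∉ l) : pvLastPart l = l := by
  cases l with
  | nil => rfl
  | cons c rest => rw [pvLastPart]; simp [h]

theorem pv_parts_last (l : List Char) : ∀ cur,
    (pvParts cur l).getLast? = some (if ',' ∈ l then pvLastPart l else cur.reverse ++ l) := by
  induction l with
  | nil => intro cur; simp [pvParts]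
  | cons c rest ih =>
    intro cur
    rw [pvParts, pvLastPart]
    by_cases hc : c = ','
    · subst hc
      have hmem : ',' ∈ (',' :: rest) := List.mem_cons_self
      simp only [hmem, if_true, List.getLast?_cons, ih []]
      by_cases hr : ',' ∈ rest
      · simp [hr]
      · simp [hr, pv_lastPart_nocomma rest hr]
    · rw [if_neg hc, ih (c :: cur)]
      by_cases hr : ',' ∈ rest
      · have : ',' ∈ (c :: rest) := List.mem_cons_of_mem _ hr
        simp [hr, this]
      · have : ',' ∉ (c :: rest) := by simp [hr, Ne.symm hc]
        simp [hr, this]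

-- pvLastPart is the suffix after the LAST comma
theorem pv_lastPart_drop (l : List Char) : ∀ (j : Nat), l[j]? = some ',' →
    (∀ i, j < i → l[i]? ≠ some ',') → pvLastPart l = l.drop (j + 1) := by
  induction l with
  | nil => intro j hj _; simp at hj
  | cons c rest ih =>
    intro j hj hno
    have hmem : ',' ∈ (c :: rest) := by
      exact List.mem_of_getElem? hj
    rw [pvLastPart, if_pos hmem]
    cases j with
    | zero =>
      have hc : c = ',' := by simpa using hj
      have hrest : ',' ∉ rest := by
        intro hr
        obtain ⟨i, hi⟩ := List.getElem?_of_mem hr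
        exact hno (i + 1) (Nat.succ_pos _) (by simpa using hi)
      simp [pv_lastPart_nocomma rest hrest]
    | succ j' =>
      have hj' : rest[j']? = some ',' := by simpa using hj
      have hno' : ∀ i, j' < i → rest[i]? ≠ some ',' := by
        intro i hi hcon
        exact hno (i + 1) (by omega) (by simpa using hcon)
      simpa using ih j' hj' hno'

theorem pv_rfind_go_nonneg (s sub : List Char) (k : Nat) :
    PySem.Chars.rfind.go s sub k = -1 ∨ 0 ≤ PySem.Chars.rfind.go s sub k := by
  induction k with
  | zero => rw [PySem.Chars.rfind.go]; split <;> simp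
  | succ j ih =>
    rw [PySem.Chars.rfind.go]
    split
    · right; positivity
    · exact ih

theorem pv_rfind_go_spec (s : List Char) (k : Nat) (h : ∀ i, k < i → s[i]? ≠ some ',') :
    (if PySem.Chars.rfind.go s [','] k = -1 then s
     else s.drop ((PySem.Chars.rfind.go s [','] k).toNat + 1)) = pvLastPart s := by
  induction k with
  | zero =>
    rw [PySem.Chars.rfind.go]
    by_cases hp : [','].isPrefixOf s = true
    · have h0 : s[0]? = some ',' := by
        have := (pv_isPrefixOf_singleton ',' s).mp hp
        simpa [List.head?_eq_getElem?] using this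
      simp only [hp, if_true]
      rw [if_neg (by omega : (0:Int) ≠ -1)]
      have := (pv_lastPart_drop s 0 h0 (fun i hi => h i hi)).symm
      simpa using this
    · have hnone : ',' ∉ s := by
        intro hm
        obtain ⟨i, hi⟩ := List.getElem?_of_mem hm
        cases i with
        | zero =>
          exact hp ((pv_isPrefixOf_singleton ',' s).mpr (by simpa [List.head?_eq_getElem?] using hi))
        | succ i' => exact h (i' + 1) (Nat.succ_pos _) hi
      simp only [Bool.not_eq_true] at hp
      simp [hp, pv_lastPart_nocomma s hnone]
  | succ j ih =>
    rw [PySem.Chars.rfind.go]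
    by_cases hp : [','].isPrefixOf (s.drop (j + 1)) = true
    · have hj : s[j+1]? = some ',' := by
        have := (pv_isPrefixOf_singleton ',' (s.drop (j + 1))).mp hp
        simpa [List.head?_drop] using this
      have heq : pvLastPart s = s.drop (j + 1 + 1) :=
        pv_lastPart_drop s (j + 1) hj (fun i hi => h i hi)
      have hne : ((j : Int) + 1) ≠ -1 := by omega
      simp only [hp, if_true]
      push_cast
      rw [if_neg hne, heq]
      congr 1
    · have h' : ∀ i, j < i → s[i]? ≠ some ',' := by
        intro i hi hcon
        rcases Nat.lt_or_ge i (j + 1 + 1) with hlt | hge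
        · have : i = j + 1 := by omega
          subst this
          exact hp ((pv_isPrefixOf_singleton ',' (s.drop (j+1))).mpr (by simpa [List.head?_drop] using hcon))
        · exact h i (by omega) hcon
      simp only [hp, Bool.false_eq_true]
      exact ih h'

-- strip is idempotent
theorem pv_dropWhile_head (p : Char → Bool) (l : List Char) (a : Char) (t : List Char)
    (h : l.dropWhile p = a :: t) : p a = false := by
  induction l with
  | nil => simp at h
  | cons c rest ih =>
    rw [List.dropWhile_cons] at h
    by_cases hc : p c = true
    · exact ih (by simpa [hc] using h)
    · simp only [hc] at h
      simp only [Bool.not_eq_true] at hc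
      obtain ⟨rfl, rfl⟩ : c = a ∧ rest = t := by
        constructor <;> [exact (List.cons.injEq _ _ _ _ ▸ h).1; exact (List.cons.injEq _ _ _ _ ▸ h).2]
      exact hc

theorem pv_dropWhile_idem (p : Char → Bool) (l : List Char) :
    (l.dropWhile p).dropWhile p = l.dropWhile p := by
  cases hd : l.dropWhile p with
  | nil => simp
  | cons a t => rw [List.dropWhile_cons, pv_dropWhile_head p l a t hd]; simp

theorem pv_rstrip_idem (l : List Char) :
    PySem.Chars.rstrip (PySem.Chars.rstrip l) = PySem.Chars.rstrip l := by
  simp [PySem.Chars.rstrip, pv_dropWhile_idem]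

theorem pv_lstrip_rstrip_lstrip (l : List Char) :
    PySem.Chars.lstrip (PySem.Chars.rstrip (PySem.Chars.lstrip l)) =
      PySem.Chars.rstrip (PySem.Chars.lstrip l) := by
  set p := PySem.Chars.isspace with hp
  show List.dropWhile p ((List.dropWhile p (List.dropWhile p l).reverse).reverse)
      = (List.dropWhile p (List.dropWhile p l).reverse).reverse
  cases hz : (List.dropWhile p (List.dropWhile p l).reverse).reverse with
  | nil => simp
  | cons a t =>
    -- head of the rstripped list is the head of (dropWhile p l), which fails p
    have hw : (List.dropWhile p (List.dropWhile p l).reverse) <:+ (List.dropWhile p l).reverse :=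
      List.dropWhile_suffix p
    have hwne : List.dropWhile p (List.dropWhile p l).reverse ≠ [] := by
      intro hcon; rw [hcon] at hz; simp at hz
    obtain ⟨u, hu⟩ := hw
    have hlast : (List.dropWhile p (List.dropWhile p l).reverse).getLast? =
        ((List.dropWhile p l).reverse).getLast? := by
      conv_rhs => rw [← hu]
      rw [List.getLast?_append_of_ne_nil u hwne]
    have hhead : (a : Char) ∈ ((List.dropWhile p l).head?) := by
      have h1 : some a = (List.dropWhile p (List.dropWhile p l).reverse).getLast? := by
        rw [← List.head?_reverse, hz]; rfl
      rw [hlast, List.getLast?_reverse] at h1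
      exact h1.symm
    cases hdl : List.dropWhile p l with
    | nil => rw [hdl] at hhead; simp at hhead
    | cons b t' =>
      have hb : b = a := by rw [hdl] at hhead; simpa using hhead
      subst hb
      have hpa : p b = false := pv_dropWhile_head p l b t' hdl
      rw [List.dropWhile_cons]
      simp [hpa]

theorem pv_strip_idem (l : List Char) :
    PySem.Chars.strip (PySem.Chars.strip l) = PySem.Chars.strip l := by
  simp [PySem.Chars.strip, pv_lstrip_rstrip_lstrip, pv_rstrip_idem]

theorem pv_pyGet?_neg_one {α : Type} (xs : List α) (h : xs ≠ []) :
    PySem.List.pyGet? xs (-1) = xs.getLast? := by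
  have hlen : 1 ≤ xs.length := List.length_pos_iff.mpr h
  simp only [PySem.List.pyGet?, PySem.List.pyIdx?]
  have h1 : ¬ (0 : Int) ≤ -1 := by omega
  have h2 : -(xs.length : Int) ≤ -1 := by omega
  rw [if_neg h1, if_pos h2]
  simp [List.getLast?_eq_getElem?]

-- A's value on a nonempty string, as strip∘strip of the last comma-free suffix
theorem pv_A_char (s : String) (hs : s ≠ "") :
    extract_location_py (some s) =
      String.ofList (PySem.Chars.strip (PySem.Chars.strip (pvLastPart s.toList))) := by
  rw [extract_location_py]
  simp only [if_neg hs]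
  have hsplit : PySem.Str.split? s "," = some ((pvParts [] s.toList).map String.ofList) := by
    rw [PySem.Str.split?, show (",".toList) = [','] from rfl, PySem.Chars.split?]
    rw [if_neg (by simp : ¬ ([','].isEmpty = true))]
    rw [pv_splitOn_eq]
    rfl
  rw [hsplit]
  simp only [Option.getD_some, List.map_map]
  set parts := (pvParts [] s.toList).map (PySem.Str.strip ∘ String.ofList) with hparts
  have hne : parts ≠ [] := by
    rw [hparts]
    intro hcon
    exact pv_parts_ne_nil [] s.toList (List.map_eq_nil_iff.mp hcon)
  have hlastsome : parts.getLast? =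
      some (PySem.Str.strip (String.ofList (pvLastPart s.toList))) := by
    rw [hparts, List.getLast?_map, pv_parts_last s.toList []]
    by_cases hm : ',' ∈ s.toList
    · simp [hm]
    · simp [hm, pv_lastPart_nocomma s.toList hm]
  have hstripped : PySem.Str.strip (String.ofList (pvLastPart s.toList)) =
      String.ofList (PySem.Chars.strip (pvLastPart s.toList)) := by
    rw [PySem.Str.strip]; simp
  by_cases h2 : 2 ≤ parts.length
  · rw [if_pos h2, pv_pyGet?_neg_one parts hne, hlastsome]
    simp only [Option.map_some, Option.getD_some, hstripped]
    rw [PySem.Str.strip]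
    simp
  · rw [if_neg h2]
    have h1 : parts.length = 1 := by
      have := List.length_pos_iff.mpr hne
      omega
    rw [if_pos h1]
    obtain ⟨x, hx⟩ := List.length_eq_one_iff.mp h1
    rw [hx]
    rw [hx] at hlastsome
    simp only [List.getLast?_singleton, Option.some.injEq] at hlastsome
    simp only [PySem.List.pyGet?, PySem.List.pyIdx?]
    norm_num
    rw [hlastsome, hstripped, PySem.Str.strip]
    simp

-- B's value on a nonempty string
theorem pv_B_char (s : String) (hs : s ≠ "") :
    extract_location_py_alt (some s) =
      String.ofList (PySem.Chars.strip (pvLastPart s.toList)) := by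
  rw [extract_location_py_alt]
  simp only [if_neg hs]
  have hr : PySem.Str.rfind s "," = PySem.Chars.rfind s.toList [','] := by
    rw [PySem.Str.rfind_eq]; rfl
  have hrg : PySem.Chars.rfind s.toList [','] = PySem.Chars.rfind.go s.toList [','] s.toList.length := rfl
  have hspec := pv_rfind_go_spec s.toList s.toList.length
    (fun i hi => by simp [List.getElem?_eq_none (le_of_lt hi)])
  by_cases hm1 : PySem.Chars.rfind.go s.toList [','] s.toList.length = -1
  · rw [hm1] at hspec
    rw [if_pos rfl] at hspec
    rw [hr, hrg, hm1, if_pos rfl, ← hspec]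
    rfl
  · have hpos : 0 ≤ PySem.Chars.rfind.go s.toList [','] s.toList.length := by
      rcases pv_rfind_go_nonneg s.toList [','] s.toList.length with hneg | hpos'
      · exact absurd hneg hm1
      · exact hpos'
    set j := PySem.Chars.rfind.go s.toList [','] s.toList.length with hj
    have hsp : s.toList.drop (j.toNat + 1) = pvLastPart s.toList := by
      rw [if_neg hm1] at hspec
      exact hspec
    rw [hr, hrg, if_neg hm1]
    have hslice : (PySem.Str.slice s (some (j + 1)) none).toList = s.toList.drop (j + 1).toNat := by
      rw [PySem.Str.toList_slice, PySem.Chars.slice_eq_listSlice,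
        PySem.List.slice_from _ (by omega : (0:Int) ≤ j + 1)]
    have htn : (j + 1).toNat = j.toNat + 1 := by omega
    show String.ofList (PySem.Chars.strip (PySem.Str.slice s (some (j + 1)) none).toList) = _
    rw [hslice, htn, hsp]

-- ===== VERDICT (by name: the statement is the Claim_ definition above) =====
theorem extract_location_py_spec : Claim_equal_extract_location_py := by
  intro address _
  unfold Spec_extract_location_py
  match address with
  | none => rfl
  | some s =>
    by_cases hs : s = ""
    · subst hs; rfl
    · rw [pv_A_char s hs, pv_B_char s hs, pv_strip_idem]
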